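-- pv_equiv track=rewrite | github.com/Cobord/HilbertScheme | src/word_funcs.py | is_yamanouchi
-- ===== SOURCE A (Python) =====
-- from typing import List, Optional
--
-- Nat = int
--
-- def is_yamanouchi(y_word: List[Nat]) -> bool:
--     """
--     is this a yamanouchi word
--     https://en.wikipedia.org/wiki/Lattice_word
--     """
--     letter_frequencies = {x: 0 for x in y_word}
--     letter_frequencies.update({max(x-1, 0): 0 for x in y_word})
--     for letter in reversed(y_word):
--         letter_frequencies[letter] += 1
--         if letter > 0 and letter_frequencies[letter] > letter_frequencies[letter-1]:
--             return False
--     return True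
-- ===== SOURCE B (Python) =====
-- def is_yamanouchi(y_word):
--     """
--     is this a yamanouchi word
--     https://en.wikipedia.org/wiki/Lattice_word
--     """
--     for v in set(y_word):
--         if v <= 0:
--             continue
--         balance = 0  # (# of v-1 seen) - (# of v seen) over the scanned suffix
--         for x in reversed(y_word):
--             if x == v - 1:
--                 balance += 1
--             elif x == v:
--                 if balance == 0:
--                     return False
--                 balance -= 1
--     return True
-- ===== Notes on version B (the rewrite author's own statement) =====
-- stated objective: alternative
-- what changed: Replaces the single reverse pass maintaining a frequency dict of all letters by K independent balanced-sequence scans, one per distinct positive value v, each tracking only the running balance count(v-1)-count(v) over the suffix.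
import Mathlib
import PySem

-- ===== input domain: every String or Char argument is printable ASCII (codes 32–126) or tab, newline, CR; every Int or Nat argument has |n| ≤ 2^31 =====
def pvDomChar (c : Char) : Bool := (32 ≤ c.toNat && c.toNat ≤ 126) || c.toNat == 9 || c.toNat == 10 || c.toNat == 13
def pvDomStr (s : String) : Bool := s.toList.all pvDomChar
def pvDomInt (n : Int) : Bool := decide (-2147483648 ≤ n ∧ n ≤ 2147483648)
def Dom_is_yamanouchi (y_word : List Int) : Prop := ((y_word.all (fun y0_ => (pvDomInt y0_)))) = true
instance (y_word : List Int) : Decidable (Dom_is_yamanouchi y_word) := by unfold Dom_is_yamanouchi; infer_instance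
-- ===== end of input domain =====

-- B replaces A's single reverse pass over a frequency dict by one independent
-- balanced-sequence scan per distinct positive letter (alternative decomposition, not faster).


-- ===== PORT A =====
-- the 'for letter in reversed(y_word)' loop with its early 'return False'.
-- Every key Python reads is pre-initialised in the dict, so 'letter_frequencies[letter]'
-- never raises; 'getD _ 0' reads those same present keys (exact here).
def isYamGoA (d : PySem.Dict Int Int) : List Int → Bool
  | [] => true
  | letter :: rest =>
    let d' := d.insert letter (d.getD letter 0 + 1)
    if letter > 0 ∧ d'.getD letter 0 > d'.getD (letter - 1) 0 then false
    else isYamGoA d' rest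

def is_yamanouchi (y_word : List Int) : Bool :=
  -- letter_frequencies = {x: 0 for x in y_word}
  let d0 := y_word.foldl (fun d x => d.insert x 0) PySem.Dict.empty
  -- letter_frequencies.update({max(x-1, 0): 0 for x in y_word})
  let d1 := y_word.foldl (fun d x => d.insert (max (x - 1) 0) 0) d0
  isYamGoA d1 y_word.reverse

-- ===== PORT B =====
-- inner 'for x in reversed(y_word)' scan for one level v, with its early 'return False'
def isYamGoB (v : Int) (bal : Int) : List Int → Bool
  | [] => true
  | x :: rest =>
    if x = v - 1 then isYamGoB v (bal + 1) rest
    else if x = v then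
      (if bal = 0 then false else isYamGoB v (bal - 1) rest)
    else isYamGoB v bal rest

def is_yamanouchi_alt (y_word : List Int) : Bool :=
  (PySem.Set.ofList y_word).all
    (fun v => if v ≤ 0 then true else isYamGoB v 0 y_word.reverse)

-- ===== PRECONDITION & SPEC =====
def Spec_is_yamanouchi (y_word : List Int) (out : Bool) : Prop := out = is_yamanouchi_alt y_word
instance (y_word : List Int) (out : Bool) : Decidable (Spec_is_yamanouchi y_word out) := by unfold Spec_is_yamanouchi; infer_instance

-- ===== CLAIM (what is proved, stated in full; the proofs are below) =====
def Claim_equal_is_yamanouchi : Prop := ∀ (y_word : List Int), Dom_is_yamanouchi y_word → Spec_is_yamanouchi y_word (is_yamanouchi y_word)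

-- ===== LEMMAS AND PROOFS =====

-- A's loop, abstracted to a pure count function c (= getD of the dict)
def okc : (Int → Int) → List Int → Bool
  | _, [] => true
  | c, x :: rest =>
    if x > 0 ∧ c x + 1 > c (x - 1) then false
    else okc (fun k => if k = x then c k + 1 else c k) rest

theorem isYamGoA_eq_okc (l : List Int) (d : PySem.Dict Int Int) :
    isYamGoA d l = okc (fun k => d.getD k 0) l := by
  induction l generalizing d with
  | nil => rfl
  | cons x rest ih =>
      have e1 : (d.insert x (d.getD x 0 + 1)).getD x 0 = d.getD x 0 + 1 :=
        PySem.Dict.getD_insert_self ..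
      have e2 : (d.insert x (d.getD x 0 + 1)).getD (x - 1) 0 = d.getD (x - 1) 0 :=
        by rw [PySem.Dict.getD_insert, if_neg (by omega : ¬ (x - 1 : Int) = x)]
      simp only [isYamGoA, okc, e1, e2]
      split_ifs with h
      · rfl
      · rw [ih]
        congr 1
        funext k
        by_cases hk : k = x <;> simp [PySem.Dict.getD_insert, hk]

theorem getD_foldl_insert_zero (f : Int → Int) (l : List Int) (d : PySem.Dict Int Int)
    (h : ∀ k, d.getD k 0 = 0) : ∀ k, (l.foldl (fun d x => d.insert (f x) 0) d).getD k 0 = 0 := by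
  induction l generalizing d with
  | nil => exact h
  | cons x rest ih =>
      intro k
      exact ih _ (fun k => by simp [PySem.Dict.getD_insert, h]) k

theorem isYamGoB_of_not_mem (v : Int) (l : List Int) (hv : v ∉ l) :
    ∀ bal, isYamGoB v bal l = true := by
  induction l with
  | nil => intro bal; rfl
  | cons x rest ih =>
      intro bal
      have hx : ¬ x = v := fun h => hv (h ▸ List.mem_cons_self ..)
      have hr : v ∉ rest := fun h => hv (List.mem_cons_of_mem _ h)
      by_cases h1 : x = v - 1 <;> simp [isYamGoB, h1, hx, ih hr]

-- one step of B's per-level scan, expressed through the updated count function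
theorem isYamGoB_step (v x : Int) (c : Int → Int) (rest : List Int)
    (h : x = v → c (v - 1) - c v ≠ 0) :
    isYamGoB v (c (v - 1) - c v) (x :: rest)
      = isYamGoB v ((if v - 1 = x then c (v - 1) + 1 else c (v - 1))
          - (if v = x then c v + 1 else c v)) rest := by
  by_cases h1 : x = v - 1
  · subst h1
    rw [if_pos rfl, if_neg (by omega : ¬ v = v - 1)]
    have e : c (v - 1) + 1 - c v = c (v - 1) - c v + 1 := by ring
    rw [e]
    simp [isYamGoB]
  · by_cases h2 : x = v
    · subst h2
      rw [if_neg (by omega : ¬ (x - 1 : Int) = x), if_pos rfl]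
      have e : c (x - 1) - (c x + 1) = c (x - 1) - c x - 1 := by ring
      rw [e]
      simp [isYamGoB, h1, h rfl]
    · rw [if_neg (fun hh => h1 hh.symm), if_neg (fun hh => h2 hh.symm)]
      simp only [isYamGoB, if_neg h1, if_neg h2]

-- the balance invariant survives one step of A's counting
theorem inv_step (x : Int) (c : Int → Int) (hinv : ∀ v : Int, 0 < v → c v ≤ c (v - 1))
    (h : 0 < x → c x < c (x - 1)) :
    ∀ v : Int, 0 < v →
      (if v = x then c v + 1 else c v) ≤ (if v - 1 = x then c (v - 1) + 1 else c (v - 1)) := by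
  intro v hv
  split_ifs with ha hb hb
  · omega
  · subst ha; have := h hv; omega
  · have := hinv v hv; omega
  · exact hinv v hv

theorem okc_iff (l : List Int) (c : Int → Int) (hinv : ∀ v : Int, 0 < v → c v ≤ c (v - 1)) :
    okc c l = true ↔ ∀ v : Int, 0 < v → isYamGoB v (c (v - 1) - c v) l = true := by
  induction l generalizing c with
  | nil => simp [okc, isYamGoB]
  | cons x rest ih =>
      by_cases hviol : 0 < x ∧ c (x - 1) = c x
      · -- violation at x: both sides are false
        obtain ⟨hx, heq⟩ := hviol
        have hA : okc c (x :: rest) = false := by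
          simp only [okc]
          rw [if_pos ⟨hx, by omega⟩]
        rw [hA]
        constructor
        · intro h; exact absurd h (by simp)
        · intro h
          have hb := h x hx
          have hbal : c (x - 1) - c x = 0 := by omega
          rw [hbal] at hb
          simp [isYamGoB, (show ¬ x = x - 1 by omega)] at hb
      · -- no violation: A continues with the updated counts
        have hA : okc c (x :: rest)
            = okc (fun k => if k = x then c k + 1 else c k) rest := by
          simp only [okc]
          rw [if_neg (by rintro ⟨h1, h2⟩; exact hviol ⟨h1, by have := hinv x h1; omega⟩)]
        have hno : 0 < x → c x < c (x - 1) := by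
          intro hx
          have := hinv x hx
          rcases eq_or_lt_of_le this with he | hl
          · exact absurd ⟨hx, he.symm⟩ hviol
          · exact hl
        rw [hA, ih _ (inv_step x c hinv hno)]
        apply forall_congr'; intro v
        apply imp_congr_right; intro hv
        rw [isYamGoB_step v x c rest
          (by intro hxv; subst hxv; have := hno hv; omega)]

theorem is_yamanouchi_eq_okc (y : List Int) :
    is_yamanouchi y = okc (fun _ => 0) y.reverse := by
  simp only [is_yamanouchi]
  rw [isYamGoA_eq_okc]
  congr 1
  funext k
  exact getD_foldl_insert_zero _ y _
    (getD_foldl_insert_zero (fun x => x) y PySem.Dict.empty (by simp)) k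

-- ===== VERDICT (by name: the statement is the Claim_ definition above) =====
theorem is_yamanouchi_spec : Claim_equal_is_yamanouchi := by
  intro y _
  unfold Spec_is_yamanouchi is_yamanouchi_alt
  have hkey := okc_iff y.reverse (fun _ => 0) (by intro v _; exact le_refl 0)
  simp only [sub_zero] at hkey
  rw [is_yamanouchi_eq_okc]
  rcases Bool.eq_false_or_eq_true (okc (fun _ => 0) y.reverse) with hb | hb
  · rw [hb]
    symm
    rw [List.all_eq_true]
    intro v _
    by_cases hv0 : v ≤ 0
    · simp [hv0]
    · simp only [if_neg hv0]
      exact hkey.mp hb v (by omega)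
  · rw [hb]
    symm
    rw [List.all_eq_false]
    have hnall : ¬ ∀ v : Int, 0 < v → isYamGoB v 0 y.reverse = true := by
      intro hall
      rw [hkey.mpr hall] at hb
      exact absurd hb (by simp)
    rw [not_forall] at hnall
    obtain ⟨v, hnv⟩ := hnall
    rw [Classical.not_imp] at hnv
    obtain ⟨hv, hgb⟩ := hnv
    have hmem : v ∈ y := by
      by_contra hm
      exact hgb (isYamGoB_of_not_mem v y.reverse (by simpa using hm) 0)
    refine ⟨v, by simpa [PySem.Set.mem_ofList] using hmem, ?_⟩
    rw [if_neg (show ¬ v ≤ 0 by omega)]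
    exact hgb
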